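-- pv_equiv track=rewrite | github.com/danielfdez17/GIW | practica1/pr1_skel.py | multiplica_escalar
-- ===== SOURCE A (Python) =====
-- def multiplica_escalar(matriz, k):
--     """
--     Devolvemos una matriz a partir de multiplicar los elementos de la matriz original por el valor k
--
--     Parámetros:
--     matriz (lista de listas): La matriz a multiplicar.
--     k (entero): El valor para multiplicar los elementos de la matriz
--
--     Returns:
--     matriz(lista de listas) | None: None en caso de que la matriz este mal construida,
--     devuelve la matriz multiplicada en caso de que es bien construida.
--     """
--
--     if len(matriz) == 0:
--         return None
--
--     size = len(matriz[0])
--     col = 0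
--     is_correct = True
--     while col < len(matriz) and is_correct:
--         if size != len(matriz[col]):
--             is_correct = False
--         col = col + 1
--
--     if is_correct is False:
--         return None
--
--     matriz_multi = []
--     for i in matriz:
--         add_fila = []
--         for j in i:
--             add_fila.append(j * k)
--
--         matriz_multi.append(add_fila)
--
--     return matriz_multi
-- ===== SOURCE B (Python) =====
-- def multiplica_escalar(matriz, k):
--     if not matriz:
--         return None
--     size = len(matriz[0])
--     resultado = []
--     for fila in matriz:
--         if len(fila) != size:
--             return None
--         resultado.append([x * k for x in fila])
--     return resultado
-- ===== Notes on version B (the rewrite author's own statement) =====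
-- stated objective: alternative
-- what changed: Fuses A's two staged passes (a flag-carrying while loop that validates all row lengths, then a separate nested build loop) into one single pass that validates each row and appends its scaled copy as it goes, returning None early at the first length mismatch.
import Mathlib
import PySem

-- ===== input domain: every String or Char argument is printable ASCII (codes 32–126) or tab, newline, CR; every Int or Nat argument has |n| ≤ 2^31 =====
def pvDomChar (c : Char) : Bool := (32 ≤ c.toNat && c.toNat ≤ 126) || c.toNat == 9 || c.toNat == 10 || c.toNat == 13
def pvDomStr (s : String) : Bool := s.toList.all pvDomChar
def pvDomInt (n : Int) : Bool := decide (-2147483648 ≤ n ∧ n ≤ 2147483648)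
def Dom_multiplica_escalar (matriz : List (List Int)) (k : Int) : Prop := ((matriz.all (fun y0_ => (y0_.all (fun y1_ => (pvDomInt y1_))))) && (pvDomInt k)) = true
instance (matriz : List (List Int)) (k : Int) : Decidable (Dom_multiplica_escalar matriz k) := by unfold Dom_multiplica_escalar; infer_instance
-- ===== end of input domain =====

-- B fuses A's staged passes (flag-while validation loop, then nested build loops) into one early-exit pass that validates and scales each row as it goes (alternative decomposition; same return value).


-- ===== PORT A =====
-- the while loop: advances over the remaining rows carrying the is_correct flag, stopping when it is false
def aCheck (size : Nat) (rows : List (List Int)) (isCorrect : Bool) : Bool :=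
  match rows with
  | [] => isCorrect
  | r :: rest =>
    if isCorrect then
      aCheck size rest (if size ≠ r.length then false else isCorrect)
    else isCorrect

def multiplica_escalar (matriz : List (List Int)) (k : Int) : Option (List (List Int)) :=
  match matriz with
  | [] => none
  | fila0 :: _ =>
    let isCorrect := aCheck fila0.length matriz true
    if isCorrect = false then none
    else
      some (matriz.foldl (fun matriz_multi i =>
        matriz_multi ++ [i.foldl (fun add_fila j => add_fila ++ [j * k]) []]) [])

-- ===== PORT B =====
-- the single fused loop: checks each row's length and appends its scaled copy, early-returning none on a mismatch
def bGo (size : Nat) (k : Int) (rows : List (List Int)) (resultado : List (List Int)) :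
    Option (List (List Int)) :=
  match rows with
  | [] => some resultado
  | fila :: rest =>
    if fila.length ≠ size then none
    else bGo size k rest (resultado ++ [fila.map (fun x => x * k)])

def multiplica_escalar_alt (matriz : List (List Int)) (k : Int) : Option (List (List Int)) :=
  match matriz with
  | [] => none
  | fila0 :: _ => bGo fila0.length k matriz []

-- ===== PRECONDITION & SPEC =====
def Spec_multiplica_escalar (matriz : List (List Int)) (k : Int) (out : Option (List (List Int))) : Prop := out = multiplica_escalar_alt matriz k
instance (matriz : List (List Int)) (k : Int) (out : Option (List (List Int))) : Decidable (Spec_multiplica_escalar matriz k out) := by unfold Spec_multiplica_escalar; infer_instance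

-- ===== CLAIM (what is proved, stated in full; the proofs are below) =====
def Claim_equal_multiplica_escalar : Prop := ∀ (matriz : List (List Int)) (k : Int), Dom_multiplica_escalar matriz k → Spec_multiplica_escalar matriz k (multiplica_escalar matriz k)

-- ===== LEMMAS AND PROOFS =====

-- append-in-a-loop is map
theorem foldl_append_map {α β : Type} (f : α → β) (xs : List α) (acc : List β) :
    xs.foldl (fun a x => a ++ [f x]) acc = acc ++ xs.map f := by
  induction xs generalizing acc with
  | nil => simp
  | cons x xs ih => simp [List.foldl, ih]

theorem aCheck_false (size : Nat) (rows : List (List Int)) :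
    aCheck size rows false = false := by
  cases rows <;> simp [aCheck]

-- the while loop computes "all remaining rows have length size"
theorem aCheck_eq_all (size : Nat) (rows : List (List Int)) :
    aCheck size rows true = rows.all (fun r => r.length == size) := by
  induction rows with
  | nil => simp [aCheck]
  | cons r rest ih =>
    by_cases h : size = r.length
    · subst h; simp [aCheck, ih]
    · simp [aCheck, h, aCheck_false, Ne.symm h]

-- the fused loop: some (acc ++ scaled rows) when all lengths match, none otherwise
theorem bGo_eq (size : Nat) (k : Int) (rows : List (List Int)) (acc : List (List Int)) :
    bGo size k rows acc =
      if rows.all (fun r => r.length == size) then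
        some (acc ++ rows.map (fun fila => fila.map (fun x => x * k)))
      else none := by
  induction rows generalizing acc with
  | nil => simp [bGo]
  | cons fila rest ih =>
    by_cases h : fila.length = size
    · simp [bGo, h, ih]
    · simp [bGo, h]

-- ===== VERDICT (by name: the statement is the Claim_ definition above) =====
theorem multiplica_escalar_spec : Claim_equal_multiplica_escalar := by
  intro matriz k _
  unfold Spec_multiplica_escalar
  match matriz with
  | [] => rfl
  | fila0 :: rest =>
    show (if aCheck fila0.length (fila0 :: rest) true = false then none
        else some ((fila0 :: rest).foldl (fun matriz_multi i =>
          matriz_multi ++ [i.foldl (fun add_fila j => add_fila ++ [j * k]) []]) []))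
      = multiplica_escalar_alt (fila0 :: rest) k
    have hB : multiplica_escalar_alt (fila0 :: rest) k = bGo fila0.length k (fila0 :: rest) [] := rfl
    rw [hB, bGo_eq]
    have hA : aCheck fila0.length (fila0 :: rest) true
        = (fila0 :: rest).all (fun r => r.length == fila0.length) := by
      simp [aCheck, aCheck_eq_all]
    rw [hA]
    by_cases h : ((fila0 :: rest).all fun r => r.length == fila0.length) = true
    · rw [h, if_neg (by simp), if_pos rfl]
      rw [foldl_append_map]
      simp only [List.nil_append]
      exact congrArg some (List.map_congr_left (fun a _ => by rw [foldl_append_map]; rfl))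
    · simp only [Bool.not_eq_true] at h
      rw [h, if_pos rfl, if_neg (by simp [h])]
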